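-- pv_equiv track=rewrite | github.com/s4lhadev/sidewalksafety | backend/app/core/llm_enrichment_service.py | _get_decision_maker_level
-- ===== SOURCE A (Python) =====
-- def _get_decision_maker_level(title: str) -> str:
--     """Get the decision-maker level for prioritization."""
--     if not title:
--         return "unknown"
--
--     title_lower = title.lower()
--
--     # Highest priority
--     if any(t in title_lower for t in ["vice president", "vp", "director", "regional", "owner", "principal", "president", "executive", "chief"]):
--         return "high"
--
--     # Medium priority
--     if any(t in title_lower for t in ["property manager", "community manager", "asset manager", "general manager", "operations manager", "portfolio manager"]):
--         return "medium"
--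
--     # Lower priority (but still decision-maker)
--     if any(t in title_lower for t in ["leasing manager", "site manager", "area manager"]):
--         return "low"
--
--     return "unknown"
-- ===== SOURCE B (Python) =====
-- _KEYWORD_RANK = {
--     "vice president": 0, "vp": 0, "director": 0, "regional": 0, "owner": 0,
--     "principal": 0, "president": 0, "executive": 0, "chief": 0,
--     "property manager": 1, "community manager": 1, "asset manager": 1,
--     "general manager": 1, "operations manager": 1, "portfolio manager": 1,
--     "leasing manager": 2, "site manager": 2, "area manager": 2,
-- }
--
-- _LEVELS = ("high", "medium", "low", "unknown")
--
--
-- def _get_decision_maker_level(title: str) -> str: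
--     """Get the decision-maker level for prioritization."""
--     title_lower = title.lower()
--     best = 3  # sentinel rank: no keyword matched
--     for kw, rank in _KEYWORD_RANK.items():
--         if rank < best and kw in title_lower:
--             best = rank
--     return _LEVELS[best]
-- ===== Notes on version B (the rewrite author's own statement) =====
-- stated objective: alternative
-- what changed: Replaced the empty-title guard plus three ordered any()-scans over separate keyword lists by a single pass over one keyword->rank dict that maintains the minimum matching rank, mapped back to a level at the end.
import Mathlib
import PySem

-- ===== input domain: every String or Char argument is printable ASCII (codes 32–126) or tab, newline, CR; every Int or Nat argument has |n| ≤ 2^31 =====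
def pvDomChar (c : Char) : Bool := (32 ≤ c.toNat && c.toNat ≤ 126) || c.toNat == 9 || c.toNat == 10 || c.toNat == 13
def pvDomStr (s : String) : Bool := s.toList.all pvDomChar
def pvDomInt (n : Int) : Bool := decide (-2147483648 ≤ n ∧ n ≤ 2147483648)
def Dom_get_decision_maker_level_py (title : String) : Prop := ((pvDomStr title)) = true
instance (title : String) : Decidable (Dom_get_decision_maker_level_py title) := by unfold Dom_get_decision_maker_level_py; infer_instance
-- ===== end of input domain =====

-- B replaces the empty-title guard and three ordered any()-scans by one min-rank pass
-- over a keyword->rank table (objective: alternative decomposition, same cost).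


-- ===== PORT A =====
def get_decision_maker_level_py (title : String) : String :=
  if title == "" then "unknown"
  else
    let title_lower := PySem.Str.lower title
    if ["vice president", "vp", "director", "regional", "owner", "principal",
        "president", "executive", "chief"].any
         (fun t => PySem.Str.isIn t title_lower) then "high"
    else if ["property manager", "community manager", "asset manager",
             "general manager", "operations manager", "portfolio manager"].any
         (fun t => PySem.Str.isIn t title_lower) then "medium"
    else if ["leasing manager", "site manager", "area manager"].any
         (fun t => PySem.Str.isIn t title_lower) then "low"
    else "unknown"

-- ===== PORT B =====
-- module-level dict _KEYWORD_RANK, as an association list in insertion order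
def pvKeywordRank : List (String × Nat) :=
  [("vice president", 0), ("vp", 0), ("director", 0), ("regional", 0), ("owner", 0),
   ("principal", 0), ("president", 0), ("executive", 0), ("chief", 0),
   ("property manager", 1), ("community manager", 1), ("asset manager", 1),
   ("general manager", 1), ("operations manager", 1), ("portfolio manager", 1),
   ("leasing manager", 2), ("site manager", 2), ("area manager", 2)]

def pvLevels : List String := ["high", "medium", "low", "unknown"]

-- the loop body of B's for-loop
def pvStep (tl : String) (best : Nat) (p : String × Nat) : Nat :=
  if p.2 < best && PySem.Str.isIn p.1 tl then p.2 else best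

def get_decision_maker_level_py_alt (title : String) : String :=
  let title_lower := PySem.Str.lower title
  let best := pvKeywordRank.foldl (pvStep title_lower) 3
  -- _LEVELS[best]: best ≤ 3 always holds, so getD is exact here
  pvLevels.getD best "unknown"

-- ===== PRECONDITION & SPEC =====
def Spec_get_decision_maker_level_py (title : String) (out : String) : Prop := out = get_decision_maker_level_py_alt title
instance (title : String) (out : String) : Decidable (Spec_get_decision_maker_level_py title out) := by unfold Spec_get_decision_maker_level_py; infer_instance

-- ===== CLAIM (what is proved, stated in full; the proofs are below) =====
def Claim_equal_get_decision_maker_level_py : Prop := ∀ (title : String), Dom_get_decision_maker_level_py title → Spec_get_decision_maker_level_py title (get_decision_maker_level_py title)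

-- ===== LEMMAS AND PROOFS =====

-- Folding B's step over a block of keywords all carrying the same rank r
theorem pvFold_const (tl : String) (r : Nat) (kws : List String) (b : Nat) :
    (kws.map (fun k => (k, r))).foldl (pvStep tl) b =
      if r < b ∧ kws.any (fun k => PySem.Str.isIn k tl) then r else b := by
  induction kws generalizing b with
  | nil => simp
  | cons k rest ih =>
    simp only [List.map_cons, List.foldl_cons, List.any_cons, pvStep, ih, PySem.Str.isIn_eq]
    by_cases hk : PySem.Chars.isIn k.toList tl.toList = true <;> by_cases hr : r < b <;>
      simp [hk, hr]

-- pvKeywordRank is the three rank blocks in order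
theorem pvKeywordRank_blocks :
    pvKeywordRank =
      (["vice president", "vp", "director", "regional", "owner", "principal",
        "president", "executive", "chief"].map (fun k => (k, 0))) ++
      (["property manager", "community manager", "asset manager",
        "general manager", "operations manager", "portfolio manager"].map (fun k => (k, 1))) ++
      (["leasing manager", "site manager", "area manager"].map (fun k => (k, 2))) := by
  rfl

theorem pvAlt_eq (title : String) :
    get_decision_maker_level_py_alt title =
      (let tl := PySem.Str.lower title
       if ["vice president", "vp", "director", "regional", "owner", "principal",
           "president", "executive", "chief"].any (fun t => PySem.Str.isIn t tl) then "high"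
       else if ["property manager", "community manager", "asset manager",
                "general manager", "operations manager", "portfolio manager"].any
             (fun t => PySem.Str.isIn t tl) then "medium"
       else if ["leasing manager", "site manager", "area manager"].any
             (fun t => PySem.Str.isIn t tl) then "low"
       else "unknown") := by
  unfold get_decision_maker_level_py_alt
  dsimp only
  rw [pvKeywordRank_blocks, List.foldl_append, List.foldl_append,
      pvFold_const, pvFold_const, pvFold_const]
  cases h0 : (["vice president", "vp", "director", "regional", "owner", "principal",
      "president", "executive", "chief"].any
        (fun t => PySem.Str.isIn t (PySem.Str.lower title))) <;>
    cases h1 : (["property manager", "community manager", "asset manager",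
        "general manager", "operations manager", "portfolio manager"].any
          (fun t => PySem.Str.isIn t (PySem.Str.lower title))) <;>
      cases h2 : (["leasing manager", "site manager", "area manager"].any
          (fun t => PySem.Str.isIn t (PySem.Str.lower title))) <;>
        decide

-- ===== VERDICT (by name: the statement is the Claim_ definition above) =====
theorem get_decision_maker_level_py_spec : Claim_equal_get_decision_maker_level_py := by
  intro title _
  show get_decision_maker_level_py title = get_decision_maker_level_py_alt title
  rw [pvAlt_eq]
  unfold get_decision_maker_level_py
  by_cases h : title = ""
  · subst h; decide
  · simp [h]
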